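-- pv_equiv track=rewrite | github.com/mivanit/muutils | _wip/newargparser.py | split_Lmask
-- ===== SOURCE A (Python) =====
-- from typing import (
--     Annotated,
--     Any,
--     Callable,
--     Optional,
--     Union,
--     _SpecialForm,
--     _type_check,
--     get_type_hints,
-- )
--
-- def split_Lmask(data: str, mask: bool) -> tuple[list[str], list[bool]]:
--     """given a mask, split the data into runs of strings which either are or are not masked"""
--
--     output_strings: list[str] = list()
--     output_masks: list[bool] = list()
--
--     prev_mask: Optional[bool] = None
--
--     for c, m in zip(data, mask):
--         if prev_mask is None:
--             # if none, we are at the start of a string. start a new run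
--             prev_mask = m
--             output_masks.append(m)
--             output_strings.append(c)
--
--         elif m == prev_mask:
--             # continue the last run
--             assert m == output_masks[-1]
--             output_strings[-1] += c
--
--         else:
--             # start a new run
--             output_masks.append(m)
--             output_strings.append(c)
--             prev_mask = m
--
--     return output_strings, output_masks
-- ===== SOURCE B (Python) =====
-- def split_Lmask(data: str, mask: bool) -> tuple[list[str], list[bool]]:
--     """given a mask, split the data into runs of strings which either are or are not masked"""
--     pairs = list(zip(data, mask))
--     output_strings: list[str] = []
--     output_masks: list[bool] = []
--     i, n = 0, len(pairs)
--     while i < n: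
--         m = pairs[i][1]
--         j = i
--         while j < n and pairs[j][1] == m:
--             j += 1
--         output_strings.append(''.join(c for c, _ in pairs[i:j]))
--         output_masks.append(m)
--         i = j
--     return output_strings, output_masks
-- ===== Notes on version B (the rewrite author's own statement) =====
-- stated objective: alternative
-- what changed: B finds each run's boundary with an inner scan and joins the whole run at once, replacing A's per-character prev_mask state machine that mutates the last accumulated string.
import Mathlib
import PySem

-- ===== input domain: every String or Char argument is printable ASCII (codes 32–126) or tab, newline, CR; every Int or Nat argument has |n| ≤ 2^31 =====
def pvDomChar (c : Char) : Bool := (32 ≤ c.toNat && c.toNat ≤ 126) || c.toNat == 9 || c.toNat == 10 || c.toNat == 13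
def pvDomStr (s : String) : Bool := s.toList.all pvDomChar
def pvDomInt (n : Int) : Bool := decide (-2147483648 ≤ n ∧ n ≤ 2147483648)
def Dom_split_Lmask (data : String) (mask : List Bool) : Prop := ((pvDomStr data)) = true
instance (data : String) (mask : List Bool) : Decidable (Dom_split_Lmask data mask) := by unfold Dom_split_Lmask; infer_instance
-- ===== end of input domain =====

-- B replaces A's per-character prev_mask state machine (which mutates the last accumulated
-- string) by a run-boundary scan that emits each whole run at once; return values agree, no speed claim.

-- ===== PORT A =====
-- output_strings[-1] += c : append c to the last element of the list
def pvAppendLast : List String → Char → List String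
  | [], _ => []
  | [s], c => [s.push c]
  | s :: rest, c => s :: pvAppendLast rest c

-- the loop body of A: state = (output_strings, output_masks, prev_mask)
def pvStepA (st : List String × List Bool × Option Bool) (cm : Char × Bool) :
    List String × List Bool × Option Bool :=
  match st, cm with
  | (S, M, none), (c, m) => (S ++ [String.ofList [c]], M ++ [m], some m)
  | (S, M, some p), (c, m) =>
      if m == p then (pvAppendLast S c, M, some p)
      else (S ++ [String.ofList [c]], M ++ [m], some m)

def split_Lmask (data : String) (mask : List Bool) : List String × List Bool :=
  let r := (data.toList.zip mask).foldl pvStepA ([], [], none)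
  (r.1, r.2.1)

-- ===== PORT B =====
-- the outer while-loop of B: scan to the run boundary (inner while = takeWhile/dropWhile),
-- join the run into one string, recurse on the remainder
def pvRunsB : List (Char × Bool) → List (String × Bool)
  | [] => []
  | (c, m) :: rest =>
      (String.ofList (c :: (rest.takeWhile (fun q => q.2 == m)).map Prod.fst), m) ::
        pvRunsB (rest.dropWhile (fun q => q.2 == m))
  termination_by l => l.length
  decreasing_by
    simp only [List.length_cons]
    exact Nat.lt_succ_of_le (List.length_dropWhile_le _ _)

def split_Lmask_alt (data : String) (mask : List Bool) : List String × List Bool :=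
  let rs := pvRunsB (data.toList.zip mask)
  (rs.map Prod.fst, rs.map Prod.snd)

-- ===== PRECONDITION & SPEC =====
def Spec_split_Lmask (data : String) (mask : List Bool) (out : List String × List Bool) : Prop := out = split_Lmask_alt data mask
instance (data : String) (mask : List Bool) (out : List String × List Bool) : Decidable (Spec_split_Lmask data mask out) := by unfold Spec_split_Lmask; infer_instance

-- ===== CLAIM (what is proved, stated in full; the proofs are below) =====
def Claim_equal_split_Lmask : Prop := ∀ (data : String) (mask : List Bool), Dom_split_Lmask data mask → Spec_split_Lmask data mask (split_Lmask data mask)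

-- ===== LEMMAS AND PROOFS =====

lemma pvAppendLast_append (S : List String) (s : String) (c : Char) :
    pvAppendLast (S ++ [s]) c = S ++ [s.push c] := by
  induction S with
  | nil => rfl
  | cons a t ih =>
      cases t with
      | nil => simp [pvAppendLast]
      | cons b u => simpa [pvAppendLast] using ih

lemma pvPush_ofList (cs : List Char) (c : Char) :
    (String.ofList cs).push c = String.ofList (cs ++ [c]) := by
  rw [String.ofList_append]
  exact ((String.append_left_inj (String.ofList cs)).mp rfl : _)

-- main invariant: running A's loop from a state whose current run is `cs` with mask `p`
lemma pvFoldA_inv (l : List (Char × Bool)) :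
    ∀ (S : List String) (M : List Bool) (cs : List Char) (p : Bool),
    (l.foldl pvStepA (S ++ [String.ofList cs], M ++ [p], some p)).1 =
      S ++ String.ofList (cs ++ (l.takeWhile (fun q => q.2 == p)).map Prod.fst) ::
        (pvRunsB (l.dropWhile (fun q => q.2 == p))).map Prod.fst ∧
    (l.foldl pvStepA (S ++ [String.ofList cs], M ++ [p], some p)).2.1 =
      M ++ p :: (pvRunsB (l.dropWhile (fun q => q.2 == p))).map Prod.snd := by
  induction l with
  | nil => intro S M cs p; simp [pvRunsB]
  | cons hd tl ih =>
      intro S M cs p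
      obtain ⟨c, m⟩ := hd
      by_cases hm : m = p
      · subst hm
        have h1 : pvStepA (S ++ [String.ofList cs], M ++ [m], some m) (c, m) =
            (S ++ [String.ofList (cs ++ [c])], M ++ [m], some m) := by
          simp [pvStepA, pvAppendLast_append, pvPush_ofList]
        simp only [List.foldl_cons, h1]
        have := ih S M (cs ++ [c]) m
        simpa [List.takeWhile, List.dropWhile, List.append_assoc] using this
      · have hm' : (m == p) = false := by simp [hm]
        have h1 : pvStepA (S ++ [String.ofList cs], M ++ [p], some p) (c, m) =
            ((S ++ [String.ofList cs]) ++ [String.ofList [c]], (M ++ [p]) ++ [m], some m) := by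
          simp [pvStepA, hm']
        simp only [List.foldl_cons, h1]
        have h2 := ih (S ++ [String.ofList cs]) (M ++ [p]) [c] m
        refine ⟨?_, ?_⟩
        · rw [h2.1]
          simp [List.dropWhile, hm', pvRunsB]
        · rw [h2.2]
          simp [List.dropWhile, hm', pvRunsB]

-- ===== VERDICT (by name: the statement is the Claim_ definition above) =====
theorem split_Lmask_spec : Claim_equal_split_Lmask := by
  intro data mask _
  unfold Spec_split_Lmask split_Lmask split_Lmask_alt
  cases hz : data.toList.zip mask with
  | nil => simp [pvRunsB]
  | cons hd tl =>
      obtain ⟨c, m⟩ := hd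
      have h0 : pvStepA ([], [], none) (c, m) = ([String.ofList [c]], [m], some m) := rfl
      have := pvFoldA_inv tl [] [] [c] m
      simp only [List.foldl_cons, h0]
      rw [Prod.mk.injEq]
      constructor
      · simpa [pvRunsB] using this.1
      · simpa [pvRunsB] using this.2
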